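-- pv_equiv track=rewrite | github.com/danielaskdd/doc-audit | skills/doc-audit/scripts/docx_edit/revision_mixin.py | _map_range_to_segments
-- ===== SOURCE A (Python) =====
-- from typing import List, Dict, Tuple, Optional
--
-- def _map_range_to_segments(segments: List[Tuple[str, Optional[str]]],
--                             start: int, end: int, operation: str) -> List[Tuple[str, str, Optional[str]]]:
--     """
--     Map a character range to segments with formatting info.
--
--     Args:
--         segments: List of (text, vert_align) tuples
--         start: Start position in plain text
--         end: End position in plain text
--         operation: 'equal' | 'delete' | 'insert'
--
--     Returns:
--         List of (operation, text, vert_align) tuples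
--     """
--     result = []
--     pos = 0
--
--     for text, vert_align in segments:
--         segment_start = pos
--         segment_end = pos + len(text)
--
--         # Check if this segment overlaps with [start, end)
--         if segment_end <= start:
--             # Before the range
--             pos = segment_end
--             continue
--         if segment_start >= end:
--             # After the range
--             break
--
--         # Calculate overlap
--         overlap_start = max(0, start - segment_start)
--         overlap_end = min(len(text), end - segment_start)
--
--         if overlap_start < overlap_end:
--             chunk = text[overlap_start:overlap_end]
--             result.append((operation, chunk, vert_align))
--
--         pos = segment_end
--
--     return result
-- ===== SOURCE B (Python) =====
-- def _map_range_to_segments(segments, start, end, operation):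
--     # Prefix-sum boundaries + binary search to skip leading non-overlapping segments.
--     ends = []
--     total = 0
--     for text, _ in segments:
--         total += len(text)
--         ends.append(total)
--     # first index whose segment end is > start (hand-rolled bisect_right)
--     lo, hi = 0, len(ends)
--     while lo < hi:
--         mid = (lo + hi) // 2
--         if ends[mid] <= start:
--             lo = mid + 1
--         else:
--             hi = mid
--     result = []
--     for i in range(lo, len(segments)):
--         text, vert_align = segments[i]
--         seg_start = ends[i] - len(text)
--         if seg_start >= end:
--             break
--         a = max(0, start - seg_start)
--         b = min(len(text), end - seg_start)
--         if a < b: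
--             result.append((operation, text[a:b], vert_align))
--     return result
-- ===== Notes on version B (the rewrite author's own statement) =====
-- stated objective: alternative
-- what changed: B precomputes a prefix-sum array of segment end offsets and binary-searches it to skip the leading non-overlapping segments, replacing A's running pos accumulator and continue-skips with an explicit boundary index.
import Mathlib
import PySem

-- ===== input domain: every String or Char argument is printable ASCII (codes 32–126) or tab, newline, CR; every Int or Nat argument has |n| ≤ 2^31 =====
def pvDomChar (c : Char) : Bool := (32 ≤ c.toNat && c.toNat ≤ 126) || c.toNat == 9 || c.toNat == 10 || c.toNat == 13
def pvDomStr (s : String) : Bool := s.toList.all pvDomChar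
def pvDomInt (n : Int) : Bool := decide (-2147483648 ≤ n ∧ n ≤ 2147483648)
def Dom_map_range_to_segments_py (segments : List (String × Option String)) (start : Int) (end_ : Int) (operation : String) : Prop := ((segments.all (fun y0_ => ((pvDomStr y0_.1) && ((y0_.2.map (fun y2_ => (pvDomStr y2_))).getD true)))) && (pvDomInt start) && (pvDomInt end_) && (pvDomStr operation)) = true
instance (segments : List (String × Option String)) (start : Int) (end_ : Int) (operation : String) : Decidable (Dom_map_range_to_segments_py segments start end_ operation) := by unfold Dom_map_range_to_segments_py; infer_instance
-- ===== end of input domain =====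

-- B replaces A's running position accumulator by a prefix-sum boundary array with a binary
-- search for the first overlapping segment (alternative decomposition, same asymptotic cost).

-- ===== PORT A =====
-- the for-loop with `continue`/`break` and the running `pos` accumulator, step for step
def mrtsA_loop (start : Int) (end_ : Int) (op : String) :
    List (String × Option String) → Int → List (String × String × Option String)
  | [], _ => []
  | (text, va) :: rest, pos =>
    let segStart := pos
    let segEnd := pos + (text.toList.length : Int)
    if segEnd ≤ start then
      mrtsA_loop start end_ op rest segEnd
    else if segStart ≥ end_ then
      []
    else
      let overlapStart := max 0 (start - segStart)
      let overlapEnd := min ((text.toList.length : Int)) (end_ - segStart)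
      (if overlapStart < overlapEnd then
        [(op, PySem.Str.slice text (some overlapStart) (some overlapEnd), va)]
       else []) ++ mrtsA_loop start end_ op rest segEnd

def map_range_to_segments_py (segments : List (String × Option String)) (start : Int) (end_ : Int) (operation : String) : List (String × String × Option String) :=
  mrtsA_loop start end_ operation segments 0

-- ===== PORT B =====
-- the first pass of Source B: ends = running totals of the segment lengths
def mrtsB_ends : List (String × Option String) → Int → List Int
  | [], _ => []
  | (t, _) :: rest, total =>
    let total' := total + (t.toList.length : Int)
    total' :: mrtsB_ends rest total'

-- Source B's hand-rolled binary search: first index with ends[i] > start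
def mrtsB_bs (ends : List Int) (start : Int) (lo hi : Nat) : Nat :=
  if lo < hi then
    let mid := (lo + hi) / 2
    if ends.getD mid 0 ≤ start then mrtsB_bs ends start (mid + 1) hi
    else mrtsB_bs ends start lo mid
  else lo
termination_by hi - lo

-- Source B's indexed emit loop from lo, with the `break`
def mrtsB_loop (segments : List (String × Option String)) (ends : List Int)
    (start end_ : Int) (op : String) (i : Nat) : List (String × String × Option String) :=
  if h : i < segments.length then
    match segments[i] with
    | (text, va) =>
      let segStart := ends.getD i 0 - (text.toList.length : Int)
      if segStart ≥ end_ then []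
      else
        let a := max 0 (start - segStart)
        let b := min ((text.toList.length : Int)) (end_ - segStart)
        (if a < b then [(op, PySem.Str.slice text (some a) (some b), va)] else []) ++
          mrtsB_loop segments ends start end_ op (i + 1)
  else []
termination_by segments.length - i

def map_range_to_segments_py_alt (segments : List (String × Option String)) (start : Int) (end_ : Int) (operation : String) : List (String × String × Option String) :=
  let ends := mrtsB_ends segments 0
  let lo := mrtsB_bs ends start 0 ends.length
  mrtsB_loop segments ends start end_ operation lo

-- ===== PRECONDITION & SPEC =====
def Spec_map_range_to_segments_py (segments : List (String × Option String)) (start : Int) (end_ : Int) (operation : String) (out : List (String × String × Option String)) : Prop := out = map_range_to_segments_py_alt segments start end_ operation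
instance (segments : List (String × Option String)) (start : Int) (end_ : Int) (operation : String) (out : List (String × String × Option String)) : Decidable (Spec_map_range_to_segments_py segments start end_ operation out) := by unfold Spec_map_range_to_segments_py; infer_instance

-- ===== CLAIM (what is proved, stated in full; the proofs are below) =====
def Claim_equal_map_range_to_segments_py : Prop := ∀ (segments : List (String × Option String)) (start : Int) (end_ : Int) (operation : String), Dom_map_range_to_segments_py segments start end_ operation → Spec_map_range_to_segments_py segments start end_ operation (map_range_to_segments_py segments start end_ operation)

-- ===== LEMMAS AND PROOFS =====

-- prefix sum of the lengths of the first i segments (= A's `pos` when i segments are consumed)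
def mrtsS : List (String × Option String) → Nat → Int
  | _, 0 => 0
  | [], _ + 1 => 0
  | p :: rest, k + 1 => (p.1.toList.length : Int) + mrtsS rest k

lemma mrtsS_nonneg (segs : List (String × Option String)) (k : Nat) : 0 ≤ mrtsS segs k := by
  induction segs generalizing k with
  | nil => cases k <;> simp [mrtsS]
  | cons p rest ih =>
    cases k with
    | zero => simp [mrtsS]
    | succ k => simp only [mrtsS]; have := ih k; positivity

lemma mrtsS_mono (segs : List (String × Option String)) {j k : Nat} (h : j ≤ k) :
    mrtsS segs j ≤ mrtsS segs k := by
  induction segs generalizing j k with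
  | nil => cases j <;> cases k <;> simp [mrtsS]
  | cons p rest ih =>
    cases j with
    | zero =>
      have := mrtsS_nonneg (p :: rest) k
      simpa [mrtsS] using this
    | succ j =>
      cases k with
      | zero => omega
      | succ k =>
        simp only [mrtsS]
        have := ih (Nat.succ_le_succ_iff.mp h)
        omega

lemma mrtsS_get (segs : List (String × Option String)) (i : Nat) (h : i < segs.length) :
    mrtsS segs (i + 1) = mrtsS segs i + (segs[i].1.toList.length : Int) := by
  induction segs generalizing i with
  | nil => simp at h
  | cons p rest ih =>
    cases i with
    | zero => simp [mrtsS]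
    | succ i =>
      simp only [mrtsS, List.getElem_cons_succ]
      rw [ih i (by simpa using h)]
      ring

lemma mrtsB_ends_length (segs : List (String × Option String)) (c : Int) :
    (mrtsB_ends segs c).length = segs.length := by
  induction segs generalizing c with
  | nil => simp [mrtsB_ends]
  | cons p rest ih => simp [mrtsB_ends, ih]

lemma mrtsB_ends_getD (segs : List (String × Option String)) (c : Int) (i : Nat)
    (h : i < segs.length) :
    (mrtsB_ends segs c).getD i 0 = c + mrtsS segs (i + 1) := by
  induction segs generalizing c i with
  | nil => simp at h
  | cons p rest ih =>
    cases i with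
    | zero => simp [mrtsB_ends, mrtsS]
    | succ i =>
      simp only [mrtsB_ends, mrtsS, List.getD_cons_succ]
      rw [ih _ i (by simpa using h)]
      ring

-- A's loop returns [] once pos has passed end_
lemma mrtsA_loop_past (start end_ : Int) (op : String) :
    ∀ (l : List (String × Option String)) (pos : Int), end_ ≤ pos →
      mrtsA_loop start end_ op l pos = [] := by
  intro l
  induction l with
  | nil => intro pos _; simp [mrtsA_loop]
  | cons p rest ih =>
    intro pos hp
    obtain ⟨text, va⟩ := p
    simp only [mrtsA_loop]
    have hlen : (0 : Int) ≤ (text.toList.length : Int) := by positivity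
    by_cases h1 : pos + (text.toList.length : Int) ≤ start
    · rw [if_pos h1]
      exact ih _ (by omega)
    · rw [if_neg h1, if_pos (by omega : pos ≥ end_)]

-- main bridge: A's loop on the suffix from i with pos = mrtsS segs i equals B's emit loop from i
lemma mrts_bridge (segs : List (String × Option String)) (start end_ : Int) (op : String) :
    ∀ (fuel i : Nat), segs.length - i ≤ fuel →
      mrtsA_loop start end_ op (segs.drop i) (mrtsS segs i) =
      mrtsB_loop segs (mrtsB_ends segs 0) start end_ op i := by
  intro fuel
  induction fuel with
  | zero =>
    intro i hf
    have hi : segs.length ≤ i := by omega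
    rw [List.drop_eq_nil_of_le hi, mrtsB_loop]
    simp [mrtsA_loop, Nat.not_lt_of_le hi]
  | succ fuel ih =>
    intro i hf
    by_cases hi : i < segs.length
    · rw [List.drop_eq_getElem_cons hi, mrtsB_loop]
      rcases hseg : segs[i] with ⟨text, va⟩
      have hgd : (mrtsB_ends segs 0).getD i 0 = mrtsS segs (i + 1) := by
        simpa using mrtsB_ends_getD segs 0 i hi
      have hS : mrtsS segs (i + 1) = mrtsS segs i + (text.toList.length : Int) := by
        rw [mrtsS_get segs i hi, hseg]
      have hlen : (0 : Int) ≤ (text.toList.length : Int) := by positivity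
      simp only [mrtsA_loop, hi, dif_pos, hgd, List.get_eq_getElem, hseg]
      have hstart : mrtsS segs (i + 1) - (text.toList.length : Int) = mrtsS segs i := by omega
      rw [hstart]
      by_cases h1 : mrtsS segs i + (text.toList.length : Int) ≤ start
      · -- A continues; B either breaks (then A's rest is empty too) or emits nothing
        rw [if_pos h1]
        by_cases h2 : mrtsS segs i ≥ end_
        · rw [if_pos h2]
          exact mrtsA_loop_past start end_ op _ _ (by omega)
        · rw [if_neg h2]
          have hab : ¬ (max 0 (start - mrtsS segs i) <
              min ((text.toList.length : Int)) (end_ - mrtsS segs i)) := by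
            have : (text.toList.length : Int) ≤ max 0 (start - mrtsS segs i) := by omega
            have : min ((text.toList.length : Int)) (end_ - mrtsS segs i) ≤
                (text.toList.length : Int) := min_le_left _ _
            omega
          rw [if_neg hab]
          simp only [List.nil_append]
          rw [← hS]
          exact ih (i + 1) (by omega)
      · rw [if_neg h1]
        by_cases h2 : mrtsS segs i ≥ end_
        · rw [if_pos h2, if_pos h2]
        · rw [if_neg h2, if_neg h2, ← hS]
          rw [ih (i + 1) (by omega)]
    · have hle : segs.length ≤ i := by omega
      rw [List.drop_eq_nil_of_le hle, mrtsB_loop]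
      simp [mrtsA_loop, Nat.not_lt_of_le hle]

-- A's loop skips the leading segments whose end offset is ≤ start
lemma mrtsA_skip (segs : List (String × Option String)) (start end_ : Int) (op : String)
    (lo : Nat) (hlo : lo ≤ segs.length)
    (hj : ∀ j, j < lo → mrtsS segs (j + 1) ≤ start) :
    ∀ (fuel i : Nat), lo - i ≤ fuel → i ≤ lo →
      mrtsA_loop start end_ op (segs.drop i) (mrtsS segs i) =
      mrtsA_loop start end_ op (segs.drop lo) (mrtsS segs lo) := by
  intro fuel
  induction fuel with
  | zero =>
    intro i hf hil
    have : i = lo := by omega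
    rw [this]
  | succ fuel ih =>
    intro i hf hil
    by_cases heq : i = lo
    · rw [heq]
    · have hi : i < segs.length := by omega
      rw [List.drop_eq_getElem_cons hi]
      rcases hseg : segs[i] with ⟨text, va⟩
      have hS : mrtsS segs (i + 1) = mrtsS segs i + (text.toList.length : Int) := by
        rw [mrtsS_get segs i hi, hseg]
      have hcont : mrtsS segs i + (text.toList.length : Int) ≤ start := by
        rw [← hS]; exact hj i (by omega)
      simp only [mrtsA_loop, if_pos hcont]
      rw [← hS]
      exact ih (i + 1) (by omega) (by omega)

-- the binary search returns an index ≤ hi below which every end offset is ≤ start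
lemma mrtsB_bs_spec (ends : List Int) (start : Int)
    (hm : ∀ j k, j ≤ k → k < ends.length → ends.getD j 0 ≤ ends.getD k 0) :
    ∀ (fuel lo hi : Nat), hi - lo ≤ fuel → lo ≤ hi → hi ≤ ends.length →
      (∀ j, j < lo → ends.getD j 0 ≤ start) →
      mrtsB_bs ends start lo hi ≤ hi ∧
        ∀ j, j < mrtsB_bs ends start lo hi → ends.getD j 0 ≤ start := by
  intro fuel
  induction fuel with
  | zero =>
    intro lo hi hf hlh hhl hj
    have : ¬ lo < hi := by omega
    rw [mrtsB_bs, if_neg this]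
    exact ⟨by omega, hj⟩
  | succ fuel ih =>
    intro lo hi hf hlh hhl hj
    rw [mrtsB_bs]
    by_cases hlt : lo < hi
    · rw [if_pos hlt]
      have hmid1 : lo ≤ (lo + hi) / 2 := by omega
      have hmid2 : (lo + hi) / 2 < hi := by omega
      by_cases hc : ends.getD ((lo + hi) / 2) 0 ≤ start
      · rw [if_pos hc]
        have := ih ((lo + hi) / 2 + 1) hi (by omega) (by omega) hhl (by
          intro j hjlt
          by_cases hjl : j < lo
          · exact hj j hjl
          · exact le_trans (hm j ((lo + hi) / 2) (by omega) (by omega)) hc)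
        exact this
      · rw [if_neg hc]
        have := ih lo ((lo + hi) / 2) (by omega) (by omega) (by omega) hj
        exact ⟨by omega, this.2⟩
    · rw [if_neg hlt]
      exact ⟨by omega, hj⟩

-- ===== VERDICT (by name: the statement is the Claim_ definition above) =====
theorem map_range_to_segments_py_spec : Claim_equal_map_range_to_segments_py := by
  intro segs start end_ op _
  unfold Spec_map_range_to_segments_py map_range_to_segments_py map_range_to_segments_py_alt
  set ends := mrtsB_ends segs 0 with hends
  have hlen : ends.length = segs.length := mrtsB_ends_length segs 0
  have hm : ∀ j k, j ≤ k → k < ends.length → ends.getD j 0 ≤ ends.getD k 0 := by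
    intro j k hjk hk
    have hk' : k < segs.length := by omega
    have hj' : j < segs.length := by omega
    rw [hends, mrtsB_ends_getD segs 0 j hj', mrtsB_ends_getD segs 0 k hk']
    have := mrtsS_mono segs (show j + 1 ≤ k + 1 by omega)
    omega
  obtain ⟨hbs1, hbs2⟩ := mrtsB_bs_spec ends start hm ends.length 0 ends.length
    (by omega) (by omega) (by omega) (by intro j hj; omega)
  set lo := mrtsB_bs ends start 0 ends.length with hlo
  have hloseg : lo ≤ segs.length := by omega
  have hj : ∀ j, j < lo → mrtsS segs (j + 1) ≤ start := by
    intro j hjlt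
    have hj' : j < segs.length := by omega
    have := hbs2 j hjlt
    rw [hends, mrtsB_ends_getD segs 0 j hj'] at this
    omega
  have h0 : mrtsA_loop start end_ op segs 0 =
      mrtsA_loop start end_ op (segs.drop 0) (mrtsS segs 0) := by
    simp [mrtsS]
  rw [h0, mrtsA_skip segs start end_ op lo hloseg hj lo 0 (by omega) (by omega)]
  exact mrts_bridge segs start end_ op (segs.length - lo) lo (by omega)
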